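-- pv_equiv track=rewrite | github.com/kkr010128/codebert | problem024/problem024_125.py | allocate
-- ===== SOURCE A (Python) =====
-- def allocate(count, weights):
--     """allocate all packages of weights onto trucks.
--     returns maximum load of trucks.
--
--     >>> allocate(2, [1, 2, 2, 6])
--     6
--     >>> allocate(3, [8, 1, 7, 3, 9])
--     10
--     """
--     def loadable_counts(maxweight):
--         n = 0
--         l = 0
--         c = count
--         for w in weights:
--             l += w
--             if l > maxweight:
--                 l = w
--                 c -= 1
--
--             if c <= 0:
--                 return n
--
--             n += 1
--         return n
--
--     i = max(weights)
--     j = max(weights) * len(weights) // count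
--
--     while i < j:
--         mid = (i + j) // 2
--         if loadable_counts(mid) < len(weights):
--             i = mid + 1
--         else:
--             j = mid
--
--     return i
-- ===== SOURCE B (Python) =====
-- def allocate(count, weights):
--     """allocate all packages of weights onto trucks.
--     returns maximum load of trucks.
--     """
--     def splits(cap):
--         # number of greedy capacity-overflow splits (trucks used minus one)
--         s = 0
--         load = 0
--         for w in weights:
--             if load + w > cap:
--                 s += 1
--                 load = w
--             else:
--                 load += w
--         return s
--
--     def search(lo, hi):
--         if lo >= hi:
--             return lo
--         mid = (lo + hi) // 2
--         if splits(mid) <= count - 1: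
--             return search(lo, mid)
--         return search(mid + 1, hi)
--
--     top = max(weights)
--     return search(top, top * len(weights) // count)
-- ===== Notes on version B (the rewrite author's own statement) =====
-- stated objective: simpler
-- what changed: The budgeted package-counting helper (running truck budget c with an early return) is replaced by a plain count of greedy capacity-overflow splits compared once against count-1, and the while-loop binary search becomes a recursive search; same probes, same result.
import Mathlib
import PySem

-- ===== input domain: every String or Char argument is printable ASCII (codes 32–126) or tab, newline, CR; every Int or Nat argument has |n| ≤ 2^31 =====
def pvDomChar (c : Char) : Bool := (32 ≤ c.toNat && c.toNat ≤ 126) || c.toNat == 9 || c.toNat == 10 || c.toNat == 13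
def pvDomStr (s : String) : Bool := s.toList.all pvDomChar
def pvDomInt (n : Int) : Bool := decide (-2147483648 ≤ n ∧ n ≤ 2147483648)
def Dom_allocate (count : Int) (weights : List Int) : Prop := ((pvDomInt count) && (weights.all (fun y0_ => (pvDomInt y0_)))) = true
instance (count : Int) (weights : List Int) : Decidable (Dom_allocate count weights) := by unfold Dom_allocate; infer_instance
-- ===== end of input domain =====

-- B replaces A's package-counting helper (running truck budget, early exit) with a plain
-- count of greedy splits and a recursive binary search; same result, no speed claim.

-- ===== PORT A =====
-- inner loop of A's loadable_counts: state (l, c, n), early return on c <= 0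
def pvLoadA (cap : Int) : List Int → Int → Int → Int → Int
  | [], _, _, n => n
  | w :: ws, l, c, n =>
      let l1 := l + w
      let l2 := if l1 > cap then w else l1
      let c2 := if l1 > cap then c - 1 else c
      if c2 ≤ 0 then n else pvLoadA cap ws l2 c2 (n + 1)

-- A's 'while i < j' binary-search loop, step for step (fuel = initial range size, a pure
-- termination device: the range shrinks by at least one per iteration, so fuel never runs out)
def pvSearchA (count : Int) (weights : List Int) : Nat → Int → Int → Int
  | 0, i, _ => i
  | fuel + 1, i, j =>
      if i < j then
        let mid := PySem.Int.floordiv (i + j) 2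
        if pvLoadA mid weights 0 count 0 < (weights.length : Int) then
          pvSearchA count weights fuel (mid + 1) j
        else
          pvSearchA count weights fuel i mid
      else i

-- max(weights) raises ValueError on []: Pre_ excludes the empty list (getD 0 unreachable);
-- '// count' raises ZeroDivisionError: Pre_ excludes count = 0.
def allocate (count : Int) (weights : List Int) : Int :=
  let i := (PySem.List.max? weights (fun x => x)).getD 0
  let j := PySem.Int.floordiv (i * (weights.length : Int)) count
  pvSearchA count weights (j - i).toNat i j

-- ===== PORT B =====
-- B's splits(cap): number of greedy capacity overflows, no truck budget, no early exit
def pvSplits (cap : Int) : List Int → Int → Int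
  | [], _ => 0
  | w :: ws, load => if load + w > cap then 1 + pvSplits cap ws w else pvSplits cap ws (load + w)

-- B's recursive search(lo, hi) (same fuel device)
def pvSearchB (count : Int) (weights : List Int) : Nat → Int → Int → Int
  | 0, lo, _ => lo
  | fuel + 1, lo, hi =>
      if lo ≥ hi then lo
      else
        let mid := PySem.Int.floordiv (lo + hi) 2
        if pvSplits mid weights 0 ≤ count - 1 then
          pvSearchB count weights fuel lo mid
        else
          pvSearchB count weights fuel (mid + 1) hi

def allocate_alt (count : Int) (weights : List Int) : Int :=
  let top := (PySem.List.max? weights (fun x => x)).getD 0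
  let hi := PySem.Int.floordiv (top * (weights.length : Int)) count
  pvSearchB count weights (hi - top).toNat top hi

-- ===== PRECONDITION & SPEC =====
-- A raises on exactly these inputs: ValueError from max([]) and ZeroDivisionError from '// count'.
def Pre_allocate (count : Int) (weights : List Int) : Prop := weights ≠ [] ∧ count ≠ 0
instance (count : Int) (weights : List Int) : Decidable (Pre_allocate count weights) := by unfold Pre_allocate; infer_instance
def pvWitness_allocate : Int × List Int := (2, [1, 2, 2, 6])

def Spec_allocate (count : Int) (weights : List Int) (out : Int) : Prop := out = allocate_alt count weights
instance (count : Int) (weights : List Int) (out : Int) : Decidable (Spec_allocate count weights out) := by unfold Spec_allocate; infer_instance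

-- ===== CLAIM (what is proved, stated in full; the proofs are below) =====
def Claim_equal_allocate : Prop := ∀ (count : Int) (weights : List Int), Dom_allocate count weights → Pre_allocate count weights → Spec_allocate count weights (allocate count weights)

-- ===== LEMMAS AND PROOFS =====

-- greedy split count is never negative
theorem pvSplits_nonneg (cap : Int) (ws : List Int) : ∀ l, (0:Int) ≤ pvSplits cap ws l := by
  induction ws with
  | nil => intro l; simp [pvSplits]
  | cons w ws ih =>
      intro l
      simp only [pvSplits]
      split
      · have := ih w; omega
      · exact ih _

-- A's helper never counts past the remaining packages
theorem pvLoadA_le (cap : Int) (ws : List Int) : ∀ l c n, pvLoadA cap ws l c n ≤ n + (ws.length : Int) := by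
  induction ws with
  | nil => intro l c n; simp [pvLoadA]
  | cons w ws ih =>
      intro l c n
      simp only [pvLoadA, List.length_cons]
      by_cases hov : l + w > cap
      · simp only [if_pos hov]
        split
        · push_cast; omega
        · have := ih w (c - 1) (n + 1); push_cast; omega
      · simp only [if_neg hov]
        split
        · push_cast; omega
        · have := ih (l + w) c (n + 1); push_cast; omega

-- A's helper counts all remaining packages exactly when the splits fit in the budget (or nothing remains)
theorem pvLoadA_eq_iff (cap : Int) (ws : List Int) :
    ∀ l c n, pvLoadA cap ws l c n = n + (ws.length : Int) ↔ (pvSplits cap ws l < c ∨ ws = []) := by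
  induction ws with
  | nil => intro l c n; simp [pvLoadA, pvSplits]
  | cons w ws ih =>
      intro l c n
      simp only [pvLoadA, pvSplits, List.length_cons]
      by_cases hov : l + w > cap
      · simp only [if_pos hov]
        by_cases hc : c - 1 ≤ 0
        · rw [if_pos hc]
          have h0 := pvSplits_nonneg cap ws w
          constructor
          · intro hn; exfalso; push_cast at hn; omega
          · rintro (hlt | h)
            · omega
            · exact absurd h (by simp)
        · rw [if_neg hc]
          have hIH := ih w (c - 1) (n + 1)
          have hle := pvLoadA_le cap ws w (c - 1) (n + 1)
          have h0 := pvSplits_nonneg cap ws w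
          constructor
          · intro hn
            have : pvLoadA cap ws w (c - 1) (n + 1) = n + 1 + (ws.length : Int) := by push_cast at hn ⊢; omega
            rcases hIH.mp this with hlt | hnil
            · left; omega
            · subst hnil; simp [pvSplits]; omega
          · rintro (hlt | h)
            · have : pvSplits cap ws w < c - 1 ∨ ws = [] := by
                rcases List.eq_nil_or_concat ws with h | _
                · right; exact h
                · left; omega
              have := hIH.mpr this
              push_cast; omega
            · exact absurd h (by simp)
      · simp only [if_neg hov]
        by_cases hc : c ≤ 0
        · rw [if_pos hc]
          have h0 := pvSplits_nonneg cap ws (l + w)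
          constructor
          · intro hn; exfalso; push_cast at hn; omega
          · rintro (hlt | h)
            · omega
            · exact absurd h (by simp)
        · rw [if_neg hc]
          have hIH := ih (l + w) c (n + 1)
          have h0 := pvSplits_nonneg cap ws (l + w)
          constructor
          · intro hn
            have : pvLoadA cap ws (l + w) c (n + 1) = n + 1 + (ws.length : Int) := by push_cast at hn ⊢; omega
            rcases hIH.mp this with hlt | hnil
            · left; exact hlt
            · subst hnil; simp [pvSplits]; omega
          · rintro (hlt | h)
            · have := hIH.mpr (Or.inl hlt)
              push_cast; omega
            · exact absurd h (by simp)

-- the probe branch tests agree: A's package test equals the negation of B's split test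
theorem pvPred_iff (count cap : Int) (weights : List Int) (hw : weights ≠ []) :
    (pvLoadA cap weights 0 count 0 < (weights.length : Int)) ↔ ¬ (pvSplits cap weights 0 ≤ count - 1) := by
  have hle := pvLoadA_le cap weights 0 count 0
  have hiff := pvLoadA_eq_iff cap weights 0 count 0
  constructor
  · intro h hs
    have h2 := hiff.mpr (Or.inl (by omega))
    omega
  · intro h
    by_cases he : pvLoadA cap weights 0 count 0 = 0 + (weights.length : Int)
    · rcases hiff.mp he with h2 | h2
      · exact absurd (by omega) h
      · exact absurd h2 hw
    · omega

-- the two searches take the same branch at every probe, hence agree (for adequate fuel)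
theorem pvSearch_eq (count : Int) (weights : List Int) (hw : weights ≠ []) :
    ∀ (fuel : Nat) (i j : Int), (j - i).toNat ≤ fuel →
      pvSearchA count weights fuel i j = pvSearchB count weights fuel i j := by
  intro fuel
  induction fuel with
  | zero => intro i j _; simp [pvSearchA, pvSearchB]
  | succ fuel ih =>
      intro i j hfuel
      by_cases h : i < j
      · rw [pvSearchA, pvSearchB]
        rw [if_pos h, if_neg (not_le.mpr h)]
        have hb := PySem.Int.floordiv_two_mid_bounds (le_of_lt h)
        have hmlt : PySem.Int.floordiv (i + j) 2 < j := by
          rw [PySem.Int.floordiv_lt_iff_lt_mul (by omega)]; omega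
        by_cases hp : pvSplits (PySem.Int.floordiv (i + j) 2) weights 0 ≤ count - 1
        · rw [if_neg (fun hA => (pvPred_iff count _ weights hw).mp hA hp), if_pos hp]
          exact ih _ _ (by omega)
        · rw [if_pos ((pvPred_iff count _ weights hw).mpr hp), if_neg hp]
          exact ih _ _ (by omega)
      · rw [pvSearchA, pvSearchB]
        rw [if_neg h, if_pos (not_lt.mp h)]

-- ===== VERDICT (by name: the statement is the Claim_ definition above) =====
theorem allocate_spec : Claim_equal_allocate := by
  intro count weights _ hpre
  unfold Spec_allocate allocate allocate_alt
  exact pvSearch_eq count weights hpre.1 _ _ _ le_rfl
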